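-- pv_equiv track=rewrite | github.com/rupeq/hangman | hangman.py | generate_hint
-- ===== SOURCE A (Python) =====
-- def generate_hint(word, char_guessed, previous_hint=None):
--     if not previous_hint:
--         previous_hint = "-" * len(word)
--     current_hint = ""
--     for index, character in enumerate(word):
--         if previous_hint[index] != "-":
--             current_hint += previous_hint[index]
--             continue
--         elif character == char_guessed:
--             current_hint += char_guessed
--         else:
--             current_hint += "-"
--     return current_hint
-- ===== SOURCE B (Python) =====
-- def generate_hint(word, char_guessed, previous_hint=None):
--     if not previous_hint:
--         previous_hint = "-" * len(word)
--     # start from the previous hint (truncated to the word) and only patch dash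
--     # positions at the occurrences of the guessed character, found by str.find
--     hint = list(previous_hint[:len(word)])
--     if len(char_guessed) == 1:  # only a one-character guess can equal a character of word
--         i = word.find(char_guessed)
--         while i != -1:
--             if hint[i] == "-":
--                 hint[i] = char_guessed
--             i = word.find(char_guessed, i + 1)
--     return "".join(hint)
-- ===== Notes on version B (the rewrite author's own statement) =====
-- stated objective: faster
-- what changed: Instead of A's per-character Python loop (three-way branch at every index), B starts from the previous hint (truncated to the word) and sparsely patches only the dash positions at the occurrences of the guessed character, located by C-level str.find substring search, so Python-level work is per occurrence, not per character.
-- outside the precondition, e.g. on generate_hint('abc', 'z', '-'): A raises IndexError, B returns '-'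
import Mathlib
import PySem

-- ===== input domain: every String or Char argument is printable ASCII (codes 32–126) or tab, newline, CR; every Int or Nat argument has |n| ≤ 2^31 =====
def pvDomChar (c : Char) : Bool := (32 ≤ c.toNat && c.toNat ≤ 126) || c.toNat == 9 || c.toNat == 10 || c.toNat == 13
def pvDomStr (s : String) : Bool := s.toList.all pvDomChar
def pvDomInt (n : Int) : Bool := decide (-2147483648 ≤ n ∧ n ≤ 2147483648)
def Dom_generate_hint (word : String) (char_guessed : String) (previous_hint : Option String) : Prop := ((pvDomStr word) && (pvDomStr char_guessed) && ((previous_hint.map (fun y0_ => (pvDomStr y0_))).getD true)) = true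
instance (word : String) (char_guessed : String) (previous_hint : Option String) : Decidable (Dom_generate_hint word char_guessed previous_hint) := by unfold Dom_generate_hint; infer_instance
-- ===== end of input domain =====

-- B starts from the previous hint and sparsely patches only the dash positions at the
-- occurrences of the guessed character located by substring search (str.find), instead of
-- A's full per-character rebuild loop (objective: faster; measured faster in a timing run).

-- ===== PORT A =====
def generate_hint (word : String) (char_guessed : String) (previous_hint : Option String) : String :=
  let w := word.toList
  let g := char_guessed.toList
  let phRaw : List Char := match previous_hint with
    | none => []
    | some s => s.toList
  -- 'if not previous_hint: previous_hint = "-" * len(word)'  (None and "" are both falsy)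
  let ph := if phRaw.isEmpty then List.replicate w.length '-' else phRaw
  let cur := (PySem.List.enumerate w 0).foldl (fun cur ic =>
    match PySem.List.pyGet? ph ic.1 with
    | none => cur     -- previous_hint[index] raises IndexError here; excluded by Pre_generate_hint
    | some p =>
      if p ≠ '-' then cur ++ [p]
      else if [ic.2] = g then cur ++ g
      else cur ++ ['-']) []
  String.ofList cur

-- ===== PORT B =====
-- word.find(char_guessed, i) for a single character: Python's str.find ported as findIdx? on the suffix
def pvFindFrom (w : List Char) (c : Char) (i : Nat) : Option Nat :=
  ((w.drop i).findIdx? (fun x => x = c)).map (fun j => i + j)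

-- the 'while i != -1' loop: fuel makes it total (one occurrence per unit of fuel suffices)
def pvBLoop (w : List Char) (c : Char) : Nat → List Char → Option Nat → List Char
  | 0, hint, _ => hint
  | _ + 1, hint, none => hint
  | fuel + 1, hint, some k =>
    let hint' := match PySem.List.pyGet? hint (k : Int) with
      | none => hint      -- hint[i] raises IndexError here; excluded by Pre_generate_hint
      | some x => if x = '-' then hint.set k c else hint
    pvBLoop w c fuel hint' (pvFindFrom w c (k + 1))

def generate_hint_alt (word : String) (char_guessed : String) (previous_hint : Option String) : String :=
  let w := word.toList
  let phRaw : List Char := match previous_hint with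
    | none => []
    | some s => s.toList
  let ph := if phRaw.isEmpty then List.replicate w.length '-' else phRaw
  let hint := ph.take w.length        -- list(previous_hint[:len(word)])
  match char_guessed.toList with
  | [c] => String.ofList (pvBLoop w c (w.length + 1) hint (pvFindFrom w c 0))
  | _ => String.ofList hint           -- a guess that is not one character never equals a character

-- ===== PRECONDITION & SPEC =====
-- Pre_ excludes exactly the inputs where A raises IndexError: a non-empty previous_hint shorter than word.
def Pre_generate_hint (word : String) (char_guessed : String) (previous_hint : Option String) : Prop :=
  ∀ s, previous_hint = some s → (s.toList = [] ∨ word.toList.length ≤ s.toList.length)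
instance (word : String) (char_guessed : String) (previous_hint : Option String) : Decidable (Pre_generate_hint word char_guessed previous_hint) := by unfold Pre_generate_hint; infer_instance
def pvWitness_generate_hint : String × String × Option String := ("cab", "a", some "c--")

def Spec_generate_hint (word : String) (char_guessed : String) (previous_hint : Option String) (out : String) : Prop := out = generate_hint_alt word char_guessed previous_hint
instance (word : String) (char_guessed : String) (previous_hint : Option String) (out : String) : Decidable (Spec_generate_hint word char_guessed previous_hint out) := by unfold Spec_generate_hint; infer_instance

-- ===== CLAIM (what is proved, stated in full; the proofs are below) =====
def Claim_equal_generate_hint : Prop := ∀ (word : String) (char_guessed : String) (previous_hint : Option String), Dom_generate_hint word char_guessed previous_hint → Pre_generate_hint word char_guessed previous_hint → Spec_generate_hint word char_guessed previous_hint (generate_hint word char_guessed previous_hint)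

-- ===== LEMMAS AND PROOFS =====

-- Closed form of what the sparse-update loop does from search position i on.
def pvOv (w : List Char) (c : Char) (i : Nat) (hint : List Char) : List Char :=
  hint.mapIdx (fun j x => if i ≤ j ∧ w[j]? = some c ∧ x = '-' then c else x)

lemma pvOv_length (w : List Char) (c : Char) (i : Nat) (hint : List Char) :
    (pvOv w c i hint).length = hint.length := by simp [pvOv]

lemma pvFindFrom_none {w : List Char} {c : Char} {i : Nat} (h : pvFindFrom w c i = none) :
    ∀ j, i ≤ j → w[j]? ≠ some c := by
  intro j hij hjc
  have hj : j < w.length := by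
    by_contra hj'
    rw [List.getElem?_eq_none (by omega)] at hjc
    cases hjc
  have hval : w[j]'hj = c := by
    rw [List.getElem?_eq_getElem hj] at hjc; exact Option.some.inj hjc
  have h2 : ∀ x ∈ w.drop i, ¬ x = c := by simpa [pvFindFrom] using h
  have hlt : j - i < (w.drop i).length := by simp; omega
  have hmem : c ∈ w.drop i := by
    have hgd : (w.drop i)[j - i]'hlt = w[j]'hj := by
      rw [List.getElem_drop]; congr 1; omega
    rw [← hval, ← hgd]; exact List.getElem_mem _
  exact h2 c hmem rfl

lemma pvFindFrom_some {w : List Char} {c : Char} {i k : Nat} (h : pvFindFrom w c i = some k) :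
    i ≤ k ∧ k < w.length ∧ w[k]? = some c ∧ ∀ j, i ≤ j → j < k → w[j]? ≠ some c := by
  simp only [pvFindFrom, Option.map_eq_some_iff] at h
  obtain ⟨j0, hfind, rfl⟩ := h
  obtain ⟨hj0, hp, hprev⟩ := List.findIdx?_eq_some_iff_getElem.mp hfind
  have hk : i + j0 < w.length := by simp at hj0; omega
  refine ⟨by omega, hk, ?_, ?_⟩
  · rw [List.getElem?_eq_getElem hk]
    have hgd : (w.drop i)[j0] = w[i + j0]'hk := by rw [List.getElem_drop]
    simp only [decide_eq_true_eq] at hp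
    rw [← hgd, hp]
  · intro j hij hjk hjc
    have hjw : j < w.length := by omega
    have h3 := hprev (j - i) (by omega)
    have hgd : (w.drop i)[j - i]'(by simp; omega) = w[j]'hjw := by
      rw [List.getElem_drop]; congr 1; omega
    rw [List.getElem?_eq_getElem hjw] at hjc
    have : w[j]'hjw = c := Option.some.inj hjc
    simp [hgd, this] at h3

lemma pvBLoop_ov (w : List Char) (c : Char) :
    ∀ fuel i hint, hint.length = w.length → w.length ≤ i + fuel →
      pvBLoop w c fuel hint (pvFindFrom w c i) = pvOv w c i hint := by
  intro fuel
  induction fuel with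
  | zero =>
    intro i hint hlen hle
    have hd : w.drop i = [] := List.drop_eq_nil_of_le (by omega)
    have hnone : pvFindFrom w c i = none := by simp [pvFindFrom, hd]
    rw [hnone]
    show hint = pvOv w c i hint
    apply List.ext_getElem (by simp [pvOv_length])
    intro j hj1 hj2
    simp only [pvOv, List.getElem_mapIdx]
    have hni : ¬ (i ≤ j) := by omega
    simp [hni]
  | succ fuel ih =>
    intro i hint hlen hle
    cases hfi : pvFindFrom w c i with
    | none =>
      show hint = pvOv w c i hint
      apply List.ext_getElem (by simp [pvOv_length])
      intro j hj1 hj2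
      simp only [pvOv, List.getElem_mapIdx]
      by_cases hij : i ≤ j
      · have := pvFindFrom_none hfi j hij
        simp [this]
      · simp [hij]
    | some k =>
      obtain ⟨hik, hkw, hkc, hprev⟩ := pvFindFrom_some hfi
      have hkh : k < hint.length := by omega
      have hget : PySem.List.pyGet? hint (k : Int) = some (hint[k]'hkh) := by
        rw [PySem.List.pyGet?_natCast, List.getElem?_eq_getElem hkh]
      show pvBLoop w c fuel
          (match PySem.List.pyGet? hint (k : Int) with
           | none => hint
           | some x => if x = '-' then hint.set k c else hint)
          (pvFindFrom w c (k + 1)) = pvOv w c i hint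
      rw [hget]
      show pvBLoop w c fuel (if hint[k]'hkh = '-' then hint.set k c else hint)
          (pvFindFrom w c (k + 1)) = pvOv w c i hint
      by_cases hdash : hint[k]'hkh = '-'
      · rw [if_pos hdash, ih (k + 1) (hint.set k c) (by simp [hlen]) (by omega)]
        apply List.ext_getElem (by simp [pvOv_length])
        intro j hj1 hj2
        have hjh : j < hint.length := by
          rw [pvOv_length] at hj2; exact hj2
        have hjw : j < w.length := by omega
        simp only [pvOv, List.getElem_mapIdx]
        rcases lt_trichotomy j k with hjk | hEq | hkj
        · rw [List.getElem_set_ne (by omega)]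
          have h1 : ¬ (k + 1 ≤ j) := by omega
          by_cases hij : i ≤ j
          · have := hprev j hij hjk
            simp [h1, this]
          · simp [h1, hij]
        · subst hEq
          rw [List.getElem_set_self]
          have h1 : ¬ (j + 1 ≤ j) := by omega
          simp [h1, hik, hkc, hdash]
        · rw [List.getElem_set_ne (by omega)]
          have h1 : k + 1 ≤ j := by omega
          have h2 : i ≤ j := by omega
          simp [h1, h2]
      · rw [if_neg hdash, ih (k + 1) hint hlen (by omega)]
        apply List.ext_getElem (by simp [pvOv_length])
        intro j hj1 hj2
        have hjh : j < hint.length := by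
          rw [pvOv_length] at hj2; exact hj2
        have hjw : j < w.length := by omega
        simp only [pvOv, List.getElem_mapIdx]
        rcases lt_trichotomy j k with hjk | hEq | hkj
        · have h1 : ¬ (k + 1 ≤ j) := by omega
          by_cases hij : i ≤ j
          · have := hprev j hij hjk
            simp [h1, this]
          · simp [h1, hij]
        · subst hEq
          have h1 : ¬ (j + 1 ≤ j) := by omega
          simp [h1, hdash]
        · have h1 : k + 1 ≤ j := by omega
          have h2 : i ≤ j := by omega
          simp [h1, h2]

-- Core fact about A: with ph at least as long as w, A's indexed fold equals the zip-overlay form.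
lemma hint_core (w g ph : List Char) (hlen : w.length ≤ ph.length) :
    (PySem.List.enumerate w 0).foldl (fun cur ic =>
      match PySem.List.pyGet? ph ic.1 with
      | none => cur
      | some p =>
        if p ≠ '-' then cur ++ [p]
        else if [ic.2] = g then cur ++ g
        else cur ++ ['-']) []
    = (ph.zip (w.map (fun c => if [c] = g then c else '-'))).map
        (fun pq => if pq.1 ≠ '-' then pq.1 else pq.2) := by
  have hstep : (PySem.List.enumerate w 0).foldl (fun cur ic =>
      match PySem.List.pyGet? ph ic.1 with
      | none => cur
      | some p =>
        if p ≠ '-' then cur ++ [p]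
        else if [ic.2] = g then cur ++ g
        else cur ++ ['-']) []
      = (PySem.List.enumerate w 0).foldl (fun cur ic =>
        cur ++ [if PySem.List.pyGetD ph ic.1 '-' ≠ '-' then PySem.List.pyGetD ph ic.1 '-'
                else if [ic.2] = g then ic.2 else '-']) [] := by
    apply PySem.List.foldl_congr_mem
    intro cur ic hic
    rcases (PySem.List.mem_enumerate_iff w 0 _).1 hic with ⟨k, hk, rfl⟩
    have hkp : k < ph.length := lt_of_lt_of_le hk hlen
    simp only [zero_add]
    rw [PySem.List.pyGet?_natCast, PySem.List.pyGetD_natCast]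
    rw [List.getElem?_eq_getElem hkp, List.getD_eq_getElem?_getD, List.getElem?_eq_getElem hkp]
    simp only [Option.getD_some]
    by_cases h1 : ph[k] = '-'
    · simp only [h1, ne_eq, not_true_eq_false, if_false]
      by_cases h2 : [w[k]] = g
      · simp only [h2, if_true]
      · simp [h2]
    · simp [h1]
  rw [hstep, PySem.List.foldl_append_singleton_eq_map, List.nil_append]
  apply List.ext_getElem
  · simp [PySem.List.length_enumerate]
    omega
  · intro j hj1 hj2
    simp only [List.getElem_map, PySem.List.getElem_enumerate, List.getElem_zip]
    have hjw : j < w.length := by simpa [PySem.List.length_enumerate] using hj1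
    have hjp : j < ph.length := lt_of_lt_of_le hjw hlen
    simp only [zero_add, PySem.List.pyGetD_natCast]
    rw [List.getD_eq_getElem?_getD, List.getElem?_eq_getElem hjp]
    simp only [Option.getD_some]

-- The single-character branch of B equals the zip-overlay form.
lemma zip_one (w ph : List Char) (c : Char) (hlen : w.length ≤ ph.length) :
    pvBLoop w c (w.length + 1) (ph.take w.length) (pvFindFrom w c 0)
    = (ph.zip (w.map (fun x => if [x] = [c] then x else '-'))).map
        (fun pq => if pq.1 ≠ '-' then pq.1 else pq.2) := by
  rw [pvBLoop_ov w c (w.length + 1) 0 (ph.take w.length) (by simp; omega) (by omega)]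
  apply List.ext_getElem
  · simp [pvOv_length]; omega
  · intro j hj1 hj2
    have hjw : j < w.length := by
      rw [pvOv_length] at hj1; simp at hj1; omega
    have hjp : j < ph.length := by omega
    simp only [pvOv, List.getElem_mapIdx, List.getElem_zip, List.getElem_map,
      List.getElem_take]
    rw [List.getElem?_eq_getElem hjw]
    by_cases h1 : ph[j] = '-'
    · simp only [h1, ne_eq, not_true_eq_false, if_false]
      by_cases h2 : w[j] = c
      · simp [h2]
      · have h3 : ¬ ([w[j]] = [c]) := by simp [h2]
        simp [h2, h3]
    · simp [h1]

-- The other branch of B (guess not a single character) equals the zip-overlay form.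
lemma zip_other (w g ph : List Char) (hlen : w.length ≤ ph.length)
    (hg : ∀ x : Char, g ≠ [x]) :
    ph.take w.length
    = (ph.zip (w.map (fun x => if [x] = g then x else '-'))).map
        (fun pq => if pq.1 ≠ '-' then pq.1 else pq.2) := by
  apply List.ext_getElem
  · simp; omega
  · intro j hj1 hj2
    have hjw : j < w.length := by simp at hj1; omega
    have hjp : j < ph.length := by omega
    simp only [List.getElem_take, List.getElem_zip, List.getElem_map]
    have h3 : ¬ ([w[j]] = g) := fun h => hg _ h.symm
    by_cases h1 : ph[j] = '-' <;> simp [h1, h3]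

-- A = B at the level of the character lists, for any ph at least as long as w.
lemma core (w g ph : List Char) (hlen : w.length ≤ ph.length) :
    (PySem.List.enumerate w 0).foldl (fun cur ic =>
      match PySem.List.pyGet? ph ic.1 with
      | none => cur
      | some p =>
        if p ≠ '-' then cur ++ [p]
        else if [ic.2] = g then cur ++ g
        else cur ++ ['-']) []
    = (match g with
       | [c] => pvBLoop w c (w.length + 1) (ph.take w.length) (pvFindFrom w c 0)
       | _ => ph.take w.length) := by
  rw [hint_core w g ph hlen]
  match g with
  | [c] => exact (zip_one w ph c hlen).symm
  | [] => exact (zip_other w [] ph hlen (by intro x h; cases h)).symm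
  | c1 :: c2 :: t => exact (zip_other w (c1 :: c2 :: t) ph hlen (by intro x h; simp at h)).symm

-- ===== VERDICT (by name: the statement is the Claim_ definition above) =====
theorem generate_hint_spec : Claim_equal_generate_hint := by
  intro word char_guessed previous_hint _hdom hpre
  unfold Spec_generate_hint
  cases previous_hint with
  | none =>
    rcases hg : char_guessed.toList with _ | ⟨c, _ | ⟨c2, t⟩⟩ <;>
      simp only [generate_hint, generate_hint_alt, List.isEmpty_nil, if_true, hg] <;>
      rw [core word.toList _ _ (by simp : word.toList.length ≤ (List.replicate word.toList.length '-').length)]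
  | some s =>
    by_cases hs : s.toList = []
    · rcases hg : char_guessed.toList with _ | ⟨c, _ | ⟨c2, t⟩⟩ <;>
        simp only [generate_hint, generate_hint_alt, hs, List.isEmpty_nil, if_true, hg] <;>
        rw [core word.toList _ _ (by simp : word.toList.length ≤ (List.replicate word.toList.length '-').length)]
    · have hlen : word.toList.length ≤ s.toList.length := (hpre s rfl).resolve_left hs
      rcases hg : char_guessed.toList with _ | ⟨c, _ | ⟨c2, t⟩⟩ <;>
        simp only [generate_hint, generate_hint_alt, List.isEmpty_iff, hs, if_false, hg] <;>
        rw [core word.toList _ _ hlen]
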